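-- pv_equiv track=rewrite | github.com/TPIOS/LeetCode-cn-solutions | 1846.py | maximumElementAfterDecrementingAndRearranging
-- ===== SOURCE A (Python) =====
-- def maximumElementAfterDecrementingAndRearranging(arr):
--     n = len(arr)
--     arr.sort()
--     start = arr[0]
--     if start != 1:
--         start = 1
--         arr[0] = 1
--     for idx in range(1,n):
--         if arr[idx] - start > 1:
--             start = start + 1
--             arr[idx] = start
--         else:
--             start = arr[idx]
--     return arr[-1]
-- ===== SOURCE B (Python) =====
-- def maximumElementAfterDecrementingAndRearranging(arr):
--     s = sorted(arr)
--     n = len(s)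
--     return min([n] + [v + n - 2 - i for i, v in enumerate(s[1:])])
-- ===== Notes on version B (the rewrite author's own statement) =====
-- stated objective: alternative
-- what changed: A runs a greedy dependent pass over the sorted array, mutating each slot from the previous one and reading the last slot; B uses the closed form min(n, min over tail positions of s[i] + (n-1-i)) -- an order-independent minimum over position-shifted values with no accumulator chain and no mutation.
import Mathlib
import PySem

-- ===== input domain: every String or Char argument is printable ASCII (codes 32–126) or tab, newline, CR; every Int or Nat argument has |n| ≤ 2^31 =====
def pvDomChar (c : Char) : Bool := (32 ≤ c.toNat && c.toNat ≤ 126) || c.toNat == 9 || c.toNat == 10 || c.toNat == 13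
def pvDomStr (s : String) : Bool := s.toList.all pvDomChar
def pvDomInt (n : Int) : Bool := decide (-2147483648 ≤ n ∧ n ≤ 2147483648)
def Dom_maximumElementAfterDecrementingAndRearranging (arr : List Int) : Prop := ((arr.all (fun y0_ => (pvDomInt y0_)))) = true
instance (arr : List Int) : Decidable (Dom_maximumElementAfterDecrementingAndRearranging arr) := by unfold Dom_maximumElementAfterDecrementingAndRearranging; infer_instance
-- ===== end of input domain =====

-- B replaces A's greedy mutating pass over the sorted array by the closed form
-- min([n] + [s[i] + n-1-i for i in the tail]) (objective: alternative). Equivalence is about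
-- the RETURN value only: A sorts and mutates its argument in place, B does not.

-- ===== PORT A =====
-- step of A's for-loop: state = (arr, start); arr[idx] read, possibly overwritten
def pvStepA (st : List Int × Int) (idx : Int) : List Int × Int :=
  match PySem.List.pyGet? st.1 idx with
  | none => st  -- unreachable: idx is always in range in A's loop
  | some v =>
    if v - st.2 > 1 then (st.1.set idx.toNat (st.2 + 1), st.2 + 1)
    else (st.1, v)

def maximumElementAfterDecrementingAndRearranging (arr : List Int) : Int :=
  let n : Int := arr.length
  let a0 := PySem.List.sorted arr (fun x => x) false
  match PySem.List.pyGet? a0 0 with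
  | none => 0  -- the initial element read raises IndexError on the empty list; excluded by Pre_
  | some s0 =>
    let st1 : List Int × Int := if s0 ≠ 1 then (a0.set 0 1, 1) else (a0, s0)
    let stF := (PySem.List.pyRange 1 n 1).foldl pvStepA st1
    (PySem.List.pyGet? stF.1 (-1)).getD 0

-- ===== PORT B =====
def maximumElementAfterDecrementingAndRearranging_alt (arr : List Int) : Int :=
  let s := PySem.List.sorted arr (fun x => x) false
  let n : Int := s.length
  (PySem.List.min?
    (n :: (PySem.List.enumerate (PySem.List.slice s (some 1) none) 0).map
      (fun p => p.2 + n - 2 - p.1))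
    (fun x => x)).getD 0

-- ===== PRECONDITION & SPEC =====
-- Pre_ excludes only the empty list, on which A's initial element read raises IndexError.
def Pre_maximumElementAfterDecrementingAndRearranging (arr : List Int) : Prop := arr ≠ []
instance (arr : List Int) : Decidable (Pre_maximumElementAfterDecrementingAndRearranging arr) := by unfold Pre_maximumElementAfterDecrementingAndRearranging; infer_instance
def pvWitness_maximumElementAfterDecrementingAndRearranging : List Int := [2, 5, 1]
def Spec_maximumElementAfterDecrementingAndRearranging (arr : List Int) (out : Int) : Prop := out = maximumElementAfterDecrementingAndRearranging_alt arr
instance (arr : List Int) (out : Int) : Decidable (Spec_maximumElementAfterDecrementingAndRearranging arr out) := by unfold Spec_maximumElementAfterDecrementingAndRearranging; infer_instance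

-- ===== CLAIM (what is proved, stated in full; the proofs are below) =====
def Claim_equal_maximumElementAfterDecrementingAndRearranging : Prop := ∀ (arr : List Int), Dom_maximumElementAfterDecrementingAndRearranging arr → Pre_maximumElementAfterDecrementingAndRearranging arr → Spec_maximumElementAfterDecrementingAndRearranging arr (maximumElementAfterDecrementingAndRearranging arr)

-- ===== LEMMAS AND PROOFS =====

-- Invariant of A's loop, for indices i..len-1: a agrees with l from i on, and a[i-1] = start.
-- Conclusion: the final array's last element equals the final start, and the final start is
-- the min-fold 'ans := min (ans+1) v' over (l.drop i) started at start.
lemma pvLoopA (l : List Int) (i : Nat) (a : List Int) (start : Int)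
    (hlen : a.length = l.length) (hi : 1 ≤ i) (hle : i ≤ l.length)
    (hrest : ∀ j, i ≤ j → j < l.length → a[j]? = l[j]?)
    (hprev : a[i-1]? = some start) :
    PySem.List.pyGet? ((PySem.List.pyRange i l.length 1).foldl pvStepA (a, start)).1 (-1)
      = some ((PySem.List.pyRange i l.length 1).foldl pvStepA (a, start)).2 ∧
    ((PySem.List.pyRange i l.length 1).foldl pvStepA (a, start)).2
      = (l.drop i).foldl (fun ans v => min (ans + 1) v) start := by
  by_cases hlt : i < l.length
  · have hcons : PySem.List.pyRange (i : Int) (l.length : Int) 1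
        = (i : Int) :: PySem.List.pyRange ((i : Int) + 1) (l.length : Int) 1 :=
      PySem.List.pyRange_one_cons (by exact_mod_cast hlt)
    have hli : l[i]? = some l[i] := List.getElem?_eq_getElem hlt
    have hget : PySem.List.pyGet? a (i : Int) = some l[i] := by
      rw [PySem.List.pyGet?_natCast, hrest i le_rfl hlt, hli]
    have hdrop : l.drop i = l[i] :: l.drop (i + 1) := List.drop_eq_getElem_cons hlt
    have hstep : pvStepA (a, start) (i : Int)
        = if l[i] - start > 1 then (a.set i (start + 1), start + 1) else (a, l[i]) := by
      simp [pvStepA, hget]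
    have hcast : ((i : Int) + 1) = ((i + 1 : Nat) : Int) := by push_cast; ring
    rw [hcons]
    simp only [List.foldl_cons, hstep, hcast, hdrop]
    by_cases hbr : l[i] - start > 1
    · rw [if_pos hbr]
      have hmin : min (start + 1) l[i] = start + 1 := by omega
      have := pvLoopA l (i + 1) (a.set i (start + 1)) (start + 1)
        (by simp [hlen]) (by omega) hlt
        (fun j hj hjl => by
          rw [List.getElem?_set_ne (by omega), hrest j (by omega) hjl])
        (by simp only [Nat.add_sub_cancel]
            rw [List.getElem?_set_self (by omega)])
      simpa [hmin] using this
    · rw [if_neg hbr]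
      have hmin : min (start + 1) l[i] = l[i] := by omega
      have := pvLoopA l (i + 1) a l[i] hlen (by omega) hlt
        (fun j hj hjl => hrest j (by omega) hjl)
        (by simpa using hrest i le_rfl hlt |>.trans hli)
      simpa [hmin] using this
  · have hieq : i = l.length := le_antisymm hle (le_of_not_gt hlt)
    have hnil : PySem.List.pyRange (i : Int) (l.length : Int) 1 = [] :=
      PySem.List.pyRange_one_eq_nil (by exact_mod_cast le_of_not_gt hlt)
    rw [hnil]
    simp only [List.foldl_nil]
    constructor
    · rw [PySem.List.pyGet?_neg_one, List.getLast?_eq_getElem?, hlen, ← hieq]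
      exact hprev
    · rw [hieq, List.drop_length, List.foldl_nil]
termination_by l.length - i

-- B's closed form equals the min-fold: folding min over the position-shifted enumerated
-- values, started at a + |t|, is the chain 'ans := min (ans+1) v' over t started at a.
lemma pvClosedForm (t : List Int) (s a : Int) :
    ((PySem.List.enumerate t s).map (fun p => p.2 + (s + (t.length : Int) - 1 - p.1))).foldl
        min (a + (t.length : Int))
      = t.foldl (fun ans v => min (ans + 1) v) a := by
  induction t generalizing s a with
  | nil => simp [PySem.List.enumerate_nil]
  | cons v t ih =>
    rw [PySem.List.enumerate_cons]
    simp only [List.map_cons, List.foldl_cons, List.length_cons]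
    have h1 : min (a + ((t.length + 1 : Nat) : Int)) (v + (s + ((t.length + 1 : Nat) : Int) - 1 - s))
        = min (a + 1) v + (t.length : Int) := by push_cast; omega
    have h2 : (fun (p : Int × Int) => p.2 + (s + ((t.length + 1 : Nat) : Int) - 1 - p.1))
        = (fun p => p.2 + ((s + 1) + (t.length : Int) - 1 - p.1)) := by
      funext p; push_cast; ring
    rw [h1, h2, ih (s + 1) (min (a + 1) v)]

-- ===== VERDICT (by name: the statement is the Claim_ definition above) =====
theorem maximumElementAfterDecrementingAndRearranging_spec : Claim_equal_maximumElementAfterDecrementingAndRearranging := by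
  intro arr _ hpre
  unfold Spec_maximumElementAfterDecrementingAndRearranging
  unfold maximumElementAfterDecrementingAndRearranging maximumElementAfterDecrementingAndRearranging_alt
  set l := PySem.List.sorted arr (fun x => x) false with hl
  have hne : l ≠ [] := by rw [hl, Ne, PySem.List.sorted_eq_nil_iff]; exact hpre
  have hlen0 : 0 < l.length := List.length_pos_iff.mpr hne
  have harr : (arr.length : Int) = (l.length : Int) := by rw [hl, PySem.List.length_sorted]
  have hget0 : PySem.List.pyGet? l 0 = some (l[0]'hlen0) := by
    rw [PySem.List.pyGet?_zero]; exact List.getElem?_eq_getElem hlen0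
  have hone : ((1 : Nat) : Int) = 1 := by norm_num
  -- B's side: closed form = fold over the tail starting at 1
  have hslice : PySem.List.slice l (some 1) none = l.drop 1 := by
    rw [PySem.List.slice_from_one, ← List.drop_one]
  have hlenD : ((l.drop 1).length : Int) = (l.length : Int) - 1 := by
    rw [List.length_drop]; omega
  have hB : (PySem.List.min?
      ((l.length : Int) :: (PySem.List.enumerate (PySem.List.slice l (some 1) none) 0).map
        (fun p => p.2 + (l.length : Int) - 2 - p.1)) (fun x => x)).getD 0
      = (l.drop 1).foldl (fun ans v => min (ans + 1) v) 1 := by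
    rw [PySem.List.min?_id_cons, Option.getD_some, hslice]
    have hfun : (fun (p : Int × Int) => p.2 + (l.length : Int) - 2 - p.1)
        = (fun p => p.2 + (0 + ((l.drop 1).length : Int) - 1 - p.1)) := by
      funext p; rw [hlenD]; ring
    have hinit : (l.length : Int) = 1 + ((l.drop 1).length : Int) := by rw [hlenD]; ring
    rw [hfun, hinit, pvClosedForm]
  simp only [harr, hget0, hB]
  by_cases hx1 : l[0]'hlen0 ≠ 1
  · rw [if_pos hx1]
    have H := pvLoopA l 1 (l.set 0 1) 1 (by simp) le_rfl hlen0
      (fun j hj hjl => List.getElem?_set_ne (by omega))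
      (by simpa using List.getElem?_set_self hlen0)
    rw [hone] at H
    rw [H.1, Option.getD_some]
    exact H.2
  · rw [if_neg hx1]
    push Not at hx1
    have H := pvLoopA l 1 l (l[0]'hlen0) rfl le_rfl hlen0
      (fun j hj hjl => rfl)
      (by simp)
    rw [hone] at H
    rw [H.1, Option.getD_some, H.2, hx1]
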